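-- pv_equiv track=rewrite | github.com/julie-oh/Algorithm-study-julie | python/on-c/10020.py | sell
-- ===== SOURCE A (Python) =====
-- def sell(p, d):
--     rem = 0
--     total = 0
--
--     for i in range(0, len(p)):
--         pick = p[i]
--         total_r = 0
--
--         for j in range(0, len(p)):
--             if pick > p[j] or pick < d[j]:
--                 continue
--
--             total_r += p[j] - d[j]
--
--         if total < total_r:
--             total = total_r
--             rem = pick
--
--
--     return rem
-- ===== SOURCE B (Python) =====
-- def sell(p, d):
--     # Event sweep: each deal j with d[j] <= p[j] adds weight p[j]-d[j] on the
--     # price interval [d[j], p[j]].  Sort the +/- events once, take prefix sums,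
--     # and answer each candidate price by binary search: O(n log n).
--     n = len(p)
--     events = []
--     for j in range(n):
--         w = p[j] - d[j]
--         if d[j] <= p[j]:
--             events.append((d[j], w))
--             events.append((p[j] + 1, -w))
--     events.sort(key=lambda e: e[0])
--     pos = [e[0] for e in events]
--     pref = [0]
--     for e in events:
--         pref.append(pref[-1] + e[1])
--     rem = 0
--     total = 0
--     for x in p:
--         # number of events with position <= x, by binary search
--         lo, hi = 0, len(pos)
--         while lo < hi:
--             mid = (lo + hi) // 2
--             if pos[mid] <= x:
--                 lo = mid + 1
--             else:
--                 hi = mid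
--         t = pref[lo]
--         if total < t:
--             total = t
--             rem = x
--     return rem
-- ===== Notes on version B (the rewrite author's own statement) =====
-- stated objective: faster
-- what changed: Replaces the quadratic rescan of all deals for every candidate price by a one-time sorted +/- event list with prefix sums, answering each candidate's coverage sum by binary search.
import Mathlib
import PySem

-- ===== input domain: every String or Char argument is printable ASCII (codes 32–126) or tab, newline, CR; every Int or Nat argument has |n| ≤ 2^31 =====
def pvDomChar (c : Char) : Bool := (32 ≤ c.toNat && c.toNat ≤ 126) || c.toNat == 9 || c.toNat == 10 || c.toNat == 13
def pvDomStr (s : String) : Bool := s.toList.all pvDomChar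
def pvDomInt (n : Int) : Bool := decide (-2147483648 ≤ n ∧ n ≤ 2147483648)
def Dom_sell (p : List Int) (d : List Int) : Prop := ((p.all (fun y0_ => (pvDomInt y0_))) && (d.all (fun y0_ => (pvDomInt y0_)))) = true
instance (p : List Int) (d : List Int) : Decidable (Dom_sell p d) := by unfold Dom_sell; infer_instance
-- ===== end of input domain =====

-- B replaces A's quadratic rescan of all deals per candidate price by one sorted
-- +/- event list with prefix sums plus a binary search per candidate (faster).

-- ===== PORT A =====
def sell (p : List Int) (d : List Int) : Int :=
  ((List.range p.length).foldl (fun (st : Int × Int) i =>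
      let pick := p.getD i 0
      let total_r := (List.range p.length).foldl (fun acc j =>
          if p.getD j 0 < pick ∨ pick < d.getD j 0 then acc
          else acc + (p.getD j 0 - d.getD j 0)) 0
      if st.2 < total_r then (pick, total_r) else st) ((0 : Int), (0 : Int))).1

-- ===== PORT B =====
-- hand-written binary search from Source B: first index in [lo, hi) whose pos value exceeds x
def bsearchB (pos : List Int) (x : Int) (lo hi : Nat) : Nat :=
  if h : lo < hi then
    if pos.getD ((lo + hi) / 2) 0 ≤ x then bsearchB pos x ((lo + hi) / 2 + 1) hi
    else bsearchB pos x lo ((lo + hi) / 2)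
  else lo
termination_by hi - lo
decreasing_by all_goals omega

def sell_alt (p : List Int) (d : List Int) : Int :=
  let n := p.length
  let events := (List.range n).foldl (fun es j =>
      if d.getD j 0 ≤ p.getD j 0 then
        es ++ [(d.getD j 0, p.getD j 0 - d.getD j 0), (p.getD j 0 + 1, -(p.getD j 0 - d.getD j 0))]
      else es) ([] : List (Int × Int))
  let sortedE := PySem.List.sorted events (fun e => e.1) false
  let pos := sortedE.map (fun e => e.1)
  let pref := sortedE.foldl (fun pr e => pr ++ [(PySem.List.pyGet? pr (-1)).getD 0 + e.2]) [(0 : Int)]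
  (p.foldl (fun (st : Int × Int) x =>
      let t := pref.getD (bsearchB pos x 0 pos.length) 0
      if st.2 < t then (x, t) else st) ((0 : Int), (0 : Int))).1

-- ===== PRECONDITION & SPEC =====
-- A (and B likewise) raises IndexError reading d[j] exactly when p is nonempty and d is
-- shorter than p; Pre_ excludes exactly those raising inputs.
def Pre_sell (p : List Int) (d : List Int) : Prop := p.length ≤ d.length
instance (p : List Int) (d : List Int) : Decidable (Pre_sell p d) := by unfold Pre_sell; infer_instance
def pvWitness_sell : List Int × List Int := ([2, 1], [1, 0])

def Spec_sell (p : List Int) (d : List Int) (out : Int) : Prop := out = sell_alt p d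
instance (p : List Int) (d : List Int) (out : Int) : Decidable (Spec_sell p d out) := by unfold Spec_sell; infer_instance

-- ===== CLAIM (what is proved, stated in full; the proofs are below) =====
def Claim_equal_sell : Prop := ∀ (p : List Int) (d : List Int), Dom_sell p d → Pre_sell p d → Spec_sell p d (sell p d)

-- ===== LEMMAS AND PROOFS =====

-- A's contribution of deal j to candidate price x
def contribA (x pj dj : Int) : Int := if pj < x ∨ x < dj then 0 else pj - dj
-- B's events generated by deal j
def evsB (pj dj : Int) : List (Int × Int) :=
  if dj ≤ pj then [(dj, pj - dj), (pj + 1, -(pj - dj))] else []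
-- running prefix sums of the second components, starting after a
def sumsB (a : Int) : List (Int × Int) → List Int
  | [] => []
  | e :: E => (a + e.2) :: sumsB (a + e.2) E

lemma evsB_filter_sum (x pj dj : Int) :
    (((evsB pj dj).filter (fun e => decide (e.1 ≤ x))).map (fun e => e.2)).sum = contribA x pj dj := by
  unfold evsB contribA
  by_cases h1 : dj ≤ pj <;> by_cases h2 : dj ≤ x <;> by_cases h3 : pj + 1 ≤ x <;>
    simp [h1, h2, h3, List.filter] <;> omega

lemma innerA_eq_sum (p d : List Int) (x : Int) :
    (List.range p.length).foldl (fun acc j =>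
        if p.getD j 0 < x ∨ x < d.getD j 0 then acc
        else acc + (p.getD j 0 - d.getD j 0)) 0
      = ((List.range p.length).map (fun j => contribA x (p.getD j 0) (d.getD j 0))).sum := by
  rw [PySem.List.foldl_congr_mem _ _ (fun acc j => acc + contribA x (p.getD j 0) (d.getD j 0)) 0
        (by intro acc j _; unfold contribA; simp only [List.getD_eq_getElem?_getD]; split_ifs <;> simp),
      PySem.List.foldl_add]
  simp

lemma eventsB_eq_flatMap (p d : List Int) :
    (List.range p.length).foldl (fun es j =>
      if d.getD j 0 ≤ p.getD j 0 then
        es ++ [(d.getD j 0, p.getD j 0 - d.getD j 0), (p.getD j 0 + 1, -(p.getD j 0 - d.getD j 0))]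
      else es) ([] : List (Int × Int))
    = (List.range p.length).flatMap (fun j => evsB (p.getD j 0) (d.getD j 0)) := by
  rw [PySem.List.foldl_congr_mem _ _ (fun es j => es ++ evsB (p.getD j 0) (d.getD j 0)) []
        (by intro es j _; unfold evsB; simp only [List.getD_eq_getElem?_getD]; split_ifs <;> simp),
      PySem.List.foldl_append_eq_flatMap]
  simp

lemma filter_sum_events (p d : List Int) (x : Int) :
    ((((List.range p.length).flatMap (fun j => evsB (p.getD j 0) (d.getD j 0))).filter
        (fun e => decide (e.1 ≤ x))).map (fun e => e.2)).sum
      = ((List.range p.length).map (fun j => contribA x (p.getD j 0) (d.getD j 0))).sum := by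
  rw [List.filter_flatMap, List.map_flatMap, List.flatMap_def, List.sum_flatten, List.map_map]
  refine congrArg List.sum (List.map_congr_left ?_)
  intro j _
  simpa using evsB_filter_sum x (p.getD j 0) (d.getD j 0)

lemma prefB_eq_sums (E : List (Int × Int)) : ∀ (pr : List Int) (a : Int),
    (PySem.List.pyGet? pr (-1)).getD 0 = a → pr ≠ [] →
    E.foldl (fun pr e => pr ++ [(PySem.List.pyGet? pr (-1)).getD 0 + e.2]) pr = pr ++ sumsB a E := by
  induction E with
  | nil => intro pr a _ _; simp [sumsB]
  | cons e E ih =>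
      intro pr a hl hne
      simp only [List.foldl_cons, hl, sumsB]
      rw [ih (pr ++ [a + e.2]) (a + e.2) (by simp [PySem.List.pyGet?, PySem.List.pyIdx?]) (by simp)]
      simp

lemma sumsB_getD (E : List (Int × Int)) : ∀ (a : Int) (k : Nat), k ≤ E.length →
    (a :: sumsB a E).getD k 0 = a + ((E.take k).map (fun e => e.2)).sum := by
  induction E with
  | nil => intro a k hk; obtain rfl := Nat.eq_zero_of_le_zero hk; simp [sumsB]
  | cons e E ih =>
      intro a k hk
      cases k with
      | zero => simp
      | succ k =>
          simp only [sumsB, List.getD_cons_succ, List.take_succ_cons, List.map_cons, List.sum_cons]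
          rw [ih (a + e.2) k (by simpa using hk)]
          ring

lemma bsearchB_spec (pos : List Int) (x : Int)
    (hm : ∀ i j : Nat, i ≤ j → j < pos.length → pos.getD i 0 ≤ pos.getD j 0) :
    ∀ lo hi : Nat, lo ≤ hi → hi ≤ pos.length →
    (∀ i, i < lo → pos.getD i 0 ≤ x) → (∀ i, hi ≤ i → i < pos.length → x < pos.getD i 0) →
    lo ≤ bsearchB pos x lo hi ∧ bsearchB pos x lo hi ≤ hi ∧
      (∀ i, i < bsearchB pos x lo hi → pos.getD i 0 ≤ x) ∧
      (∀ i, bsearchB pos x lo hi ≤ i → i < pos.length → x < pos.getD i 0) := by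
  intro lo hi
  induction lo, hi using bsearchB.induct pos x with
  | case1 lo hi h hmid ih =>
      intro _ hhi hlo hhiP
      rw [bsearchB]
      simp only [dif_pos h, if_pos hmid]
      set mid := (lo + hi) / 2 with hmiddef
      have hmlt : mid < hi := by omega
      obtain ⟨a, b, c, e⟩ := ih (by omega) hhi
        (fun i hi' => by
          rcases Nat.lt_or_ge i mid with hc | hc
          · exact le_trans (hm i mid (by omega) (by omega)) hmid
          · have : i = mid := by omega
            subst this; exact hmid)
        hhiP
      exact ⟨by omega, b, c, e⟩
  | case2 lo hi h hmid ih =>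
      intro hle hhi hlo hhiP
      rw [bsearchB]
      simp only [dif_pos h, if_neg hmid]
      set mid := (lo + hi) / 2 with hmiddef
      have : mid < hi := by omega
      obtain ⟨a, b, c, e⟩ := ih (by omega) (by omega) hlo
        (fun i hi1 hi2 => lt_of_not_ge fun hcon => hmid (le_trans (hm mid i hi1 hi2) hcon))
      exact ⟨a, by omega, c, e⟩
  | case3 lo hi h =>
      intro hle hhi hlo hhiP
      rw [bsearchB]
      simp only [dif_neg h]
      exact ⟨le_refl _, by omega, hlo, fun i hi1 hi2 => hhiP i (by omega) hi2⟩

lemma take_bsearch_eq_filter (E : List (Int × Int)) (x : Int)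
    (hE : ∀ i j : Nat, i ≤ j → j < E.length → (E.getD i (0, 0)).1 ≤ (E.getD j (0, 0)).1) :
    E.take (bsearchB (E.map (fun e => e.1)) x 0 (E.map (fun e => e.1)).length)
      = E.filter (fun e => decide (e.1 ≤ x)) := by
  set pos := E.map (fun e => e.1) with hpos
  have hlen : pos.length = E.length := by simp [hpos]
  have hval : ∀ i : Nat, i < E.length → pos.getD i 0 = (E.getD i (0, 0)).1 := by
    intro i hi
    rw [List.getD_eq_getElem pos 0 (by omega), List.getD_eq_getElem E (0, 0) hi]
    simp [hpos]
  have hm : ∀ i j : Nat, i ≤ j → j < pos.length → pos.getD i 0 ≤ pos.getD j 0 := by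
    intro i j hij hj
    rw [hval i (by omega), hval j (by omega)]
    exact hE i j hij (by omega)
  obtain ⟨-, hr2, hr3, hr4⟩ := bsearchB_spec pos x hm 0 pos.length (Nat.zero_le _) (le_refl _)
      (fun i hi => absurd hi (Nat.not_lt_zero i)) (fun i h1 h2 => absurd h1 (by omega))
  set r := bsearchB pos x 0 pos.length with hr
  conv_rhs => rw [← List.take_append_drop r E]
  rw [List.filter_append]
  rw [List.filter_eq_self.mpr, List.filter_eq_nil_iff.mpr, List.append_nil]
  · intro e he
    obtain ⟨i, hi, rfl⟩ := List.mem_iff_getElem.mp he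
    have hiE : r + i < E.length := by
      have := List.length_drop (l := E) (i := r); omega
    rw [List.getElem_drop]
    have := hr4 (r + i) (by omega) (by omega)
    rw [hval (r + i) hiE, List.getD_eq_getElem E (0, 0) hiE] at this
    simp only [decide_eq_true_eq]
    omega
  · intro e he
    obtain ⟨i, hi, rfl⟩ := List.mem_iff_getElem.mp he
    have hir : i < r := by
      have := List.length_take (i := r) (l := E); omega
    have hiE : i < E.length := by omega
    rw [List.getElem_take]
    have := hr3 i hir
    rw [hval i hiE, List.getD_eq_getElem E (0, 0) hiE] at this
    simpa using this
lemma map_getD_range (l : List Int) : (List.range l.length).map (fun i => l.getD i 0) = l := by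
  apply List.ext_getElem
  · simp
  · intro i h1 h2
    simp [List.getD_eq_getElem?_getD, List.getElem?_eq_getElem h2]

lemma foldl_range_getD (f : (Int × Int) → Int → (Int × Int)) (l : List Int) (init : Int × Int) :
    (List.range l.length).foldl (fun st i => f st (l.getD i 0)) init = l.foldl f init := by
  conv_rhs => rw [← map_getD_range l]
  rw [List.foldl_map]

-- ===== VERDICT (by name: the statement is the Claim_ definition above) =====
theorem sell_spec : Claim_equal_sell := by
  intro p d _ _
  unfold Spec_sell
  show sell p d = sell_alt p d
  -- name the pieces of sell_alt
  have hA : sell p d =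
      (p.foldl (fun (st : Int × Int) pick =>
        if st.2 < (List.range p.length).foldl (fun acc j =>
            if p.getD j 0 < pick ∨ pick < d.getD j 0 then acc
            else acc + (p.getD j 0 - d.getD j 0)) 0
        then (pick, (List.range p.length).foldl (fun acc j =>
            if p.getD j 0 < pick ∨ pick < d.getD j 0 then acc
            else acc + (p.getD j 0 - d.getD j 0)) 0)
        else st) ((0 : Int), (0 : Int))).1 := by
    unfold sell
    rw [foldl_range_getD (f := fun st pick =>
      if st.2 < (List.range p.length).foldl (fun acc j =>
          if p.getD j 0 < pick ∨ pick < d.getD j 0 then acc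
          else acc + (p.getD j 0 - d.getD j 0)) 0
      then (pick, (List.range p.length).foldl (fun acc j =>
          if p.getD j 0 < pick ∨ pick < d.getD j 0 then acc
          else acc + (p.getD j 0 - d.getD j 0)) 0)
      else st)]
  rw [hA]
  -- reduce sell_alt's lets and rewrite its ingredients
  show _ =
    (p.foldl (fun (st : Int × Int) x =>
      let sortedE := PySem.List.sorted
        ((List.range p.length).foldl (fun es j =>
          if d.getD j 0 ≤ p.getD j 0 then
            es ++ [(d.getD j 0, p.getD j 0 - d.getD j 0), (p.getD j 0 + 1, -(p.getD j 0 - d.getD j 0))]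
          else es) ([] : List (Int × Int))) (fun e => e.1) false
      let t := (sortedE.foldl (fun pr e => pr ++ [(PySem.List.pyGet? pr (-1)).getD 0 + e.2])
          [(0 : Int)]).getD (bsearchB (sortedE.map (fun e => e.1)) x 0 (sortedE.map (fun e => e.1)).length) 0
      if st.2 < t then (x, t) else st) ((0 : Int), (0 : Int))).1
  congr 1
  apply PySem.List.foldl_congr_mem
  intro st x _
  simp only []
  set sortedE := PySem.List.sorted
      ((List.range p.length).foldl (fun es j =>
        if d.getD j 0 ≤ p.getD j 0 then
          es ++ [(d.getD j 0, p.getD j 0 - d.getD j 0), (p.getD j 0 + 1, -(p.getD j 0 - d.getD j 0))]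
        else es) ([] : List (Int × Int))) (fun e => e.1) false with hsortedE
  have hkey :
      (sortedE.foldl (fun pr e => pr ++ [(PySem.List.pyGet? pr (-1)).getD 0 + e.2])
          [(0 : Int)]).getD (bsearchB (sortedE.map (fun e => e.1)) x 0 (sortedE.map (fun e => e.1)).length) 0
        = (List.range p.length).foldl (fun acc j =>
            if p.getD j 0 < x ∨ x < d.getD j 0 then acc
            else acc + (p.getD j 0 - d.getD j 0)) 0 := by
    have hmono : ∀ i j : Nat, i ≤ j → j < sortedE.length →
        (sortedE.getD i (0, 0)).1 ≤ (sortedE.getD j (0, 0)).1 := by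
      intro i j hij hj
      rw [List.getD_eq_getElem sortedE (0, 0) (by omega), List.getD_eq_getElem sortedE (0, 0) hj]
      simp only [hsortedE]
      exact PySem.List.key_sorted_getElem_mono _ (fun e : Int × Int => e.1) hij (by simpa [hsortedE] using hj)
    have hposm : ∀ i j : Nat, i ≤ j → j < (sortedE.map (fun e => e.1)).length →
        (sortedE.map (fun e => e.1)).getD i 0 ≤ (sortedE.map (fun e => e.1)).getD j 0 := by
      intro i j hij hj
      have hj' : j < sortedE.length := by simpa using hj
      rw [List.getD_eq_getElem _ 0 (by simpa using lt_of_le_of_lt hij hj),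
          List.getD_eq_getElem _ 0 hj]
      simp only [List.getElem_map]
      have := hmono i j hij hj'
      rw [List.getD_eq_getElem sortedE (0, 0) (by omega), List.getD_eq_getElem sortedE (0, 0) hj'] at this
      exact this
    have hrle : bsearchB (sortedE.map (fun e => e.1)) x 0 (sortedE.map (fun e => e.1)).length
        ≤ sortedE.length := by
      obtain ⟨-, h2, -, -⟩ := bsearchB_spec (sortedE.map (fun e => e.1)) x hposm
        0 (sortedE.map (fun e => e.1)).length (Nat.zero_le _) (le_refl _)
        (fun i hi => absurd hi (Nat.not_lt_zero i)) (fun i h1 h2 => absurd h1 (by omega))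
      simpa using h2
    rw [prefB_eq_sums sortedE [(0 : Int)] 0 (by simp [PySem.List.pyGet?, PySem.List.pyIdx?]) (by simp)]
    show ((0 : Int) :: sumsB 0 sortedE).getD _ 0 = _
    rw [sumsB_getD sortedE 0 _ hrle, take_bsearch_eq_filter sortedE x hmono]
    rw [hsortedE]
    have hperm : (PySem.List.sorted
        ((List.range p.length).foldl (fun es j =>
          if d.getD j 0 ≤ p.getD j 0 then
            es ++ [(d.getD j 0, p.getD j 0 - d.getD j 0), (p.getD j 0 + 1, -(p.getD j 0 - d.getD j 0))]
          else es) ([] : List (Int × Int))) (fun e => e.1) false).Perm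
        ((List.range p.length).flatMap (fun j => evsB (p.getD j 0) (d.getD j 0))) := by
      rw [← eventsB_eq_flatMap p d]
      exact PySem.List.sorted_perm _ _ _
    rw [List.Perm.sum_eq (List.Perm.map _ (List.Perm.filter _ hperm))]
    rw [filter_sum_events p d x, innerA_eq_sum p d x]
    ring
  rw [hkey]
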